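-- pv_equiv track=rewrite | github.com/RiyaThakore/Leetcode | Maximum-product-of-word-lengths/max-prod-word-len.py | maxProd
-- ===== SOURCE A (Python) =====
-- import collections
--
-- def maxProd(words):
--   lookup = collections.defaultdict(set)
--   for w in words:
--     lookup[w]=set(w)
--   def common(s,t):
--     if lookup[s]&lookup[t]:
--       return False
--     return True
--   mx=0
--   for i in words:
--     for j in words:
--       if common(i,j):
--         mx=max(mx, len(i)*len(j))
--   return mx
-- ===== SOURCE B (Python) =====
-- def maxProd(words):
--     # Sort by length descending, then for each word take the FIRST later word
--     # whose letter set is disjoint (because lengths descend, the first disjoint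
--     # partner already gives the best product for that word) and stop the scan.
--     ys = sorted(words, key=len, reverse=True)
--     res = 0
--     rest = ys
--     while rest:
--         w = rest[0]
--         rest = rest[1:]
--         for u in rest:
--             if not (set(w) & set(u)):
--                 res = max(res, len(w) * len(u))
--                 break
--     return res
-- ===== Notes on version B (the rewrite author's own statement) =====
-- stated objective: faster
-- what changed: Replaces A's full nested scan over all word pairs by sort-then-prune: sort words by length descending, then for each word scan only the later words and stop at the FIRST letter-disjoint partner, which by the descending order already yields that word's best product.
import Mathlib
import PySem

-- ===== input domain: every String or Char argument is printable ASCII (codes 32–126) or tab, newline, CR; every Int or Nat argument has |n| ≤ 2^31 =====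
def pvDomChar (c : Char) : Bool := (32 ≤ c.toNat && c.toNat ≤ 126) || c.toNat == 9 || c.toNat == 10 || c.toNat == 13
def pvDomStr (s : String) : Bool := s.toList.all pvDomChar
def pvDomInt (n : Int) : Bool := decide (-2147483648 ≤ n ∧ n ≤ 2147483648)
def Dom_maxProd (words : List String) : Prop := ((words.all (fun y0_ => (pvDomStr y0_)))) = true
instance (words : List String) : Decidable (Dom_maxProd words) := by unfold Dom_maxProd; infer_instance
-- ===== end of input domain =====

-- B replaces A's full all-pairs scan by sort-then-prune: sort by length descending and,
-- for each word, stop the scan over the later words at the FIRST letter-disjoint partner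
-- (by the descending order it already gives that word's best product). Objective: faster (early-terminated pair scan).

-- ===== PORT A =====
-- 'lookup[s] & lookup[t]' truthiness: nonempty intersection; s,t are always members of words,
-- so the defaultdict read is ported as getD with the empty set (exact on these calls).
def maxProdCommon (lookup : PySem.Dict String (PySem.Set Char)) (s t : String) : Bool :=
  if PySem.Set.inter (lookup.getD s PySem.Set.empty) (lookup.getD t PySem.Set.empty) ≠ [] then
    false
  else
    true

def maxProd (words : List String) : Int :=
  let lookup := words.foldl (fun d w => d.insert w (PySem.Set.ofList w.toList)) PySem.Dict.empty
  words.foldl (fun mx i =>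
    words.foldl (fun mx j =>
      if maxProdCommon lookup i j then max mx (PySem.Str.len i * PySem.Str.len j) else mx) mx) 0

-- ===== PORT B =====
-- inner 'for u in rest: if not (set(w) & set(u)): res = max(res, len(w)*len(u)); break'
def maxProdInner (w : String) (res : Int) : List String → Int
  | [] => res
  | u :: t =>
      if PySem.Set.inter (PySem.Set.ofList w.toList) (PySem.Set.ofList u.toList) = [] then
        max res (PySem.Str.len w * PySem.Str.len u)
      else maxProdInner w res t

-- outer 'while rest: w, rest = rest[0], rest[1:]; <inner loop>'
def maxProdOuter : List String → Int → Int
  | [], res => res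
  | w :: rest, res => maxProdOuter rest (maxProdInner w res rest)

def maxProd_alt (words : List String) : Int :=
  maxProdOuter (PySem.List.sorted words (fun w => PySem.Str.len w) true) 0

-- ===== PRECONDITION & SPEC =====
def Spec_maxProd (words : List String) (out : Int) : Prop := out = maxProd_alt words
instance (words : List String) (out : Int) : Decidable (Spec_maxProd words out) := by unfold Spec_maxProd; infer_instance

-- ===== CLAIM (what is proved, stated in full; the proofs are below) =====
def Claim_equal_maxProd : Prop := ∀ (words : List String), Dom_maxProd words → Spec_maxProd words (maxProd words)

-- ===== LEMMAS AND PROOFS =====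

-- the abstract disjointness both conditions express
def pvDisj (i j : String) : Prop := ∀ c ∈ i.toList, c ∉ j.toList

theorem pv_inter_nil_iff (xs ys : List Char) :
    (PySem.Set.inter (PySem.Set.ofList xs) (PySem.Set.ofList ys) = []) ↔ ∀ c ∈ xs, c ∉ ys := by
  rw [List.eq_nil_iff_forall_not_mem]
  simp only [PySem.Set.mem_inter, PySem.Set.mem_ofList]
  exact forall_congr' fun c => not_and

theorem pvDisj_symm {i j : String} (h : pvDisj i j) : pvDisj j i :=
  fun c hc hci => h c hci hc

theorem pv_len_nonneg (w : String) : 0 ≤ PySem.Str.len w := by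
  rw [PySem.Str.len_eq]; exact Int.natCast_nonneg _

theorem pv_len_self_zero {i : String} (h : pvDisj i i) : PySem.Str.len i = 0 := by
  have hn : i.toList = [] := List.eq_nil_iff_forall_not_mem.mpr (fun c hc => h c hc hc)
  simp [pysem, hn]

-- === A-side: the lookup dict and the 'common' test ===

theorem pv_lookup_not_mem (x : String) :
    ∀ (l : List String) (d : PySem.Dict String (PySem.Set Char)), x ∉ l →
      (l.foldl (fun d w => d.insert w (PySem.Set.ofList w.toList)) d).getD x PySem.Set.empty =
        d.getD x PySem.Set.empty := by
  intro l
  induction l with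
  | nil => intro d _; rfl
  | cons w t ih =>
      intro d hx
      have hxw : x ≠ w := fun h => hx (by rw [h]; exact List.mem_cons_self ..)
      simp only [List.foldl_cons]
      rw [ih _ (fun h => hx (List.mem_cons_of_mem _ h)),
        PySem.Dict.getD_insert_of_ne _ _ _ hxw]

theorem pv_lookup_getD (x : String) :
    ∀ (l : List String) (d : PySem.Dict String (PySem.Set Char)), x ∈ l →
      (l.foldl (fun d w => d.insert w (PySem.Set.ofList w.toList)) d).getD x PySem.Set.empty =
        PySem.Set.ofList x.toList := by
  intro l
  induction l with
  | nil => intro d hx; cases hx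
  | cons w t ih =>
      intro d hx
      simp only [List.foldl_cons]
      by_cases ht : x ∈ t
      · exact ih _ ht
      · rcases List.mem_cons.mp hx with rfl | h
        · rw [pv_lookup_not_mem x t _ ht, PySem.Dict.getD_insert_self]
        · exact absurd h ht

theorem pv_common_iff (words : List String) (i j : String) (hi : i ∈ words) (hj : j ∈ words) :
    maxProdCommon (words.foldl (fun d w => d.insert w (PySem.Set.ofList w.toList)) PySem.Dict.empty) i j = true ↔
      pvDisj i j := by
  unfold maxProdCommon
  rw [pv_lookup_getD i words _ hi, pv_lookup_getD j words _ hj]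
  split_ifs with h
  · constructor
    · intro hf; cases hf
    · intro hd; exact absurd ((pv_inter_nil_iff _ _).mpr hd) h
  · exact iff_of_true rfl ((pv_inter_nil_iff _ _).mp (not_ne_iff.mp h))

-- === generic bounds for A's nested conditional-max fold (Bool test b) ===

theorem pv_le_fold_init (ys : List String) (b : String → Bool) (g : String → Int) :
    ∀ init : Int, init ≤ ys.foldl (fun a j => if b j then max a (g j) else a) init := by
  induction ys with
  | nil => intro init; simp
  | cons y t ih =>
      intro init
      simp only [List.foldl_cons]
      refine le_trans ?_ (ih _)
      split_ifs <;> simp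

theorem pv_le_dfold_init (xs ys : List String) (b : String → String → Bool)
    (g : String → String → Int) :
    ∀ init : Int,
      init ≤ xs.foldl (fun a i => ys.foldl (fun a j => if b i j then max a (g i j) else a) a) init := by
  induction xs with
  | nil => intro init; simp
  | cons x t ih =>
      intro init
      exact le_trans (pv_le_fold_init ys (b x) (g x) init) (ih _)

theorem pv_fold_le (ys : List String) (b : String → Bool) (g : String → Int) (C : Int)
    (h : ∀ j ∈ ys, b j = true → g j ≤ C) :
    ∀ init : Int, init ≤ C → ys.foldl (fun a j => if b j then max a (g j) else a) init ≤ C := by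
  induction ys with
  | nil => intro init h0; simpa using h0
  | cons y t ih =>
      intro init h0
      simp only [List.foldl_cons]
      refine ih (fun j hj hb => h j (by simp [hj]) hb) _ ?_
      split_ifs with hb
      · exact max_le h0 (h y (by simp) hb)
      · exact h0

theorem pv_dfold_le (xs ys : List String) (b : String → String → Bool)
    (g : String → String → Int) (C : Int)
    (h : ∀ i ∈ xs, ∀ j ∈ ys, b i j = true → g i j ≤ C) :
    ∀ init : Int, init ≤ C →
      xs.foldl (fun a i => ys.foldl (fun a j => if b i j then max a (g i j) else a) a) init ≤ C := by
  induction xs with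
  | nil => intro init h0; simpa using h0
  | cons x t ih =>
      intro init h0
      simp only [List.foldl_cons]
      exact ih (fun i hi j hj hb => h i (by simp [hi]) j hj hb) _
        (pv_fold_le ys (b x) (g x) C (fun j hj hb => h x (by simp) j hj hb) init h0)

theorem pv_le_fold_mem (ys : List String) (b : String → Bool) (g : String → Int)
    {j : String} (hj : j ∈ ys) (hb : b j = true) :
    ∀ init : Int, g j ≤ ys.foldl (fun a j => if b j then max a (g j) else a) init := by
  induction ys with
  | nil => cases hj
  | cons y t ih =>
      intro init
      simp only [List.foldl_cons]
      rcases List.mem_cons.mp hj with rfl | hj'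
      · refine le_trans ?_ (pv_le_fold_init t b g _)
        simp [hb]
      · exact ih hj' _

theorem pv_le_dfold_mem (xs ys : List String) (b : String → String → Bool)
    (g : String → String → Int)
    {i j : String} (hi : i ∈ xs) (hj : j ∈ ys) (hb : b i j = true) :
    ∀ init : Int,
      g i j ≤ xs.foldl (fun a i => ys.foldl (fun a j => if b i j then max a (g i j) else a) a) init := by
  induction xs with
  | nil => cases hi
  | cons x t ih =>
      intro init
      simp only [List.foldl_cons]
      rcases List.mem_cons.mp hi with rfl | hi'
      · exact le_trans (pv_le_fold_mem ys (b i) (g i) hj hb init) (pv_le_dfold_init t ys b g _)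
      · exact ih hi' _

-- === B-side bounds ===

theorem pv_le_inner (w : String) : ∀ (rest : List String) (res : Int),
    res ≤ maxProdInner w res rest := by
  intro rest
  induction rest with
  | nil => intro res; simp [maxProdInner]
  | cons u t ih =>
      intro res
      unfold maxProdInner
      split_ifs
      · exact le_max_left _ _
      · exact ih res

theorem pv_le_outer : ∀ (l : List String) (res : Int), res ≤ maxProdOuter l res := by
  intro l
  induction l with
  | nil => intro res; simp [maxProdOuter]
  | cons w t ih => intro res; exact le_trans (pv_le_inner w t res) (ih _)

theorem pv_inner_reach (w u : String) (hd : pvDisj w u) :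
    ∀ (rest : List String), u ∈ rest →
      rest.Pairwise (fun a b => PySem.Str.len b ≤ PySem.Str.len a) →
      ∀ res : Int, PySem.Str.len w * PySem.Str.len u ≤ maxProdInner w res rest := by
  intro rest
  induction rest with
  | nil => intro hu; cases hu
  | cons v t ih =>
      intro hu hp res
      rw [List.pairwise_cons] at hp
      unfold maxProdInner
      split_ifs with hv
      · rcases List.mem_cons.mp hu with rfl | hu'
        · exact le_max_right _ _
        · refine le_trans ?_ (le_max_right _ _)
          exact mul_le_mul_of_nonneg_left (hp.1 u hu') (pv_len_nonneg w)
      · have huv : u ≠ v := fun h => hv ((pv_inter_nil_iff _ _).mpr (h ▸ hd))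
        rcases List.mem_cons.mp hu with rfl | hu'
        · exact absurd rfl huv
        · exact ih hu' hp.2 res

theorem pv_outer_reach (w u : String) (hd : pvDisj w u) (l2 : List String)
    (hu : u ∈ l2) (hp : l2.Pairwise (fun a b => PySem.Str.len b ≤ PySem.Str.len a)) :
    ∀ (l1 : List String) (res : Int),
      PySem.Str.len w * PySem.Str.len u ≤ maxProdOuter (l1 ++ w :: l2) res := by
  intro l1
  induction l1 with
  | nil =>
      intro res
      simp only [List.nil_append, maxProdOuter]
      exact le_trans (pv_inner_reach w u hd l2 hu hp _) (pv_le_outer l2 _)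
  | cons x t ih =>
      intro res
      simp only [List.cons_append, maxProdOuter]
      exact ih _

theorem pv_inner_le (w : String) (C : Int) :
    ∀ (rest : List String), (∀ u ∈ rest, pvDisj w u → PySem.Str.len w * PySem.Str.len u ≤ C) →
      ∀ res : Int, res ≤ C → maxProdInner w res rest ≤ C := by
  intro rest
  induction rest with
  | nil => intro _ res h0; simpa [maxProdInner] using h0
  | cons v t ih =>
      intro h res h0
      unfold maxProdInner
      split_ifs with hv
      · exact max_le h0 (h v (by simp) ((pv_inter_nil_iff _ _).mp hv))
      · exact ih (fun u hu hdu => h u (by simp [hu]) hdu) res h0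

theorem pv_outer_le (C : Int) :
    ∀ (l : List String),
      (∀ w ∈ l, ∀ u ∈ l, pvDisj w u → PySem.Str.len w * PySem.Str.len u ≤ C) →
      ∀ res : Int, res ≤ C → maxProdOuter l res ≤ C := by
  intro l
  induction l with
  | nil => intro _ res h0; simpa [maxProdOuter] using h0
  | cons w t ih =>
      intro h res h0
      unfold maxProdOuter
      exact ih (fun w' hw' u hu hdu => h w' (by simp [hw']) u (by simp [hu]) hdu) _
        (pv_inner_le w C t (fun u hu hdu => h w (by simp) u (by simp [hu]) hdu) res h0)

-- both occurrences, ordered, in a list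
theorem pv_split {α : Type} (i j : α) (hne : i ≠ j) :
    ∀ (l : List α), i ∈ l → j ∈ l →
      (∃ l1 l2, l = l1 ++ i :: l2 ∧ j ∈ l2) ∨ (∃ l1 l2, l = l1 ++ j :: l2 ∧ i ∈ l2) := by
  intro l
  induction l with
  | nil => intro hi _; cases hi
  | cons x t ih =>
      intro hi hj
      rcases List.mem_cons.mp hi with rfl | hi'
      · left
        exact ⟨[], t, rfl, (List.mem_cons.mp hj).resolve_left (fun h => hne h.symm)⟩
      · rcases List.mem_cons.mp hj with rfl | hj'
        · right; exact ⟨[], t, rfl, hi'⟩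
        · rcases ih hi' hj' with ⟨l1, l2, he, hm⟩ | ⟨l1, l2, he, hm⟩
          · left; exact ⟨x :: l1, l2, by rw [he]; rfl, hm⟩
          · right; exact ⟨x :: l1, l2, by rw [he]; rfl, hm⟩

-- ===== VERDICT (by name: the statement is the Claim_ definition above) =====
theorem maxProd_spec : Claim_equal_maxProd := by
  intro words _
  unfold Spec_maxProd maxProd maxProd_alt
  set lookup := words.foldl (fun d w => d.insert w (PySem.Set.ofList w.toList)) PySem.Dict.empty with hl
  set ys := PySem.List.sorted words (fun w => PySem.Str.len w) true with hys
  have hmem : ∀ x, x ∈ ys ↔ x ∈ words := fun x => by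
    rw [hys]; exact PySem.List.mem_sorted _ _ _ _
  have hpair : ys.Pairwise (fun a b => PySem.Str.len b ≤ PySem.Str.len a) := by
    rw [hys]; exact PySem.List.sorted_pairwise_rev _ _
  apply le_antisymm
  · apply pv_dfold_le words words (fun i j => maxProdCommon lookup i j)
      (fun i j => PySem.Str.len i * PySem.Str.len j) _ _ 0 (pv_le_outer ys 0)
    intro i hi j hj hb
    show PySem.Str.len i * PySem.Str.len j ≤ maxProdOuter ys 0
    have hd : pvDisj i j := (pv_common_iff words i j hi hj).mp hb
    by_cases hij : i = j
    · subst hij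
      rw [pv_len_self_zero hd, zero_mul]
      exact pv_le_outer ys 0
    · rcases pv_split i j hij ys ((hmem i).mpr hi) ((hmem j).mpr hj) with
        ⟨l1, l2, he, hm⟩ | ⟨l1, l2, he, hm⟩
      · have hp2 : l2.Pairwise (fun a b => PySem.Str.len b ≤ PySem.Str.len a) := by
          rw [he] at hpair
          exact ((List.pairwise_append.mp hpair).2.1).sublist (List.sublist_cons_self _ _)
        rw [he]
        exact pv_outer_reach i j hd l2 hm hp2 l1 0
      · have hp2 : l2.Pairwise (fun a b => PySem.Str.len b ≤ PySem.Str.len a) := by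
          rw [he] at hpair
          exact ((List.pairwise_append.mp hpair).2.1).sublist (List.sublist_cons_self _ _)
        rw [he, mul_comm]
        exact pv_outer_reach j i (pvDisj_symm hd) l2 hm hp2 l1 0
  · apply pv_outer_le _ ys _ 0
      (pv_le_dfold_init words words (fun i j => maxProdCommon lookup i j)
        (fun i j => PySem.Str.len i * PySem.Str.len j) 0)
    intro w hw u hu hd
    exact pv_le_dfold_mem words words (fun i j => maxProdCommon lookup i j)
      (fun i j => PySem.Str.len i * PySem.Str.len j)
      ((hmem w).mp hw) ((hmem u).mp hu)
      ((pv_common_iff words w u ((hmem w).mp hw) ((hmem u).mp hu)).mpr hd) 0
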